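-- pv_equiv track=rewrite | github.com/jiaying2508/variation_number | vn.py | replaceAA
-- ===== SOURCE A (Python) =====
-- def replaceAA(sequence, seqType):
--     if seqType == 'nucleotide':
--         return sequence
--     seq = ''
--     for char in sequence:
--         if char in 'ARNDCQEGHILKMFPSTWYV':
--             seq = seq + char
--         else:
--             seq = seq + 'X'
--     return seq
-- ===== SOURCE B (Python) =====
-- _AA = frozenset('ARNDCQEGHILKMFPSTWYV')
--
-- def replaceAA(sequence, seqType):
--     if seqType == 'nucleotide':
--         return sequence
--     # run-based: copy maximal runs of standard AA letters as whole slices,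
--     # emit one 'X' per offending character, join at the end
--     parts = []
--     i, n = 0, len(sequence)
--     while i < n:
--         j = i
--         while j < n and sequence[j] in _AA:
--             j += 1
--         parts.append(sequence[i:j])
--         if j < n:
--             parts.append('X')
--             j += 1
--         i = j
--     return ''.join(parts)
-- ===== Notes on version B (the rewrite author's own statement) =====
-- stated objective: alternative
-- what changed: Replaces the per-character accumulation loop by a run-based scan that copies maximal runs of valid amino-acid letters as whole slices into a parts list, emits one 'X' per invalid character, and joins once at the end.
import Mathlib
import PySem

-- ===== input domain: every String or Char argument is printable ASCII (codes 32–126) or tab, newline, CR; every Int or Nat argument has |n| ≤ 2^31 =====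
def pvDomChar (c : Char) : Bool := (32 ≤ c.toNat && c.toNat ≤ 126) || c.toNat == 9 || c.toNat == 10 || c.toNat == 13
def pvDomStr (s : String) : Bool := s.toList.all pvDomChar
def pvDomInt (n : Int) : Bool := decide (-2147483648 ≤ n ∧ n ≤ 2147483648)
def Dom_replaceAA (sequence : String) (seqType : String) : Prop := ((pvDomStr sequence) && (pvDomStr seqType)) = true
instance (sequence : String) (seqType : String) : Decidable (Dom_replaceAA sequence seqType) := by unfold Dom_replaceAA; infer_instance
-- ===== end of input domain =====

-- B replaces A's per-character accumulation loop by a run-based scan: maximal runs of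
-- standard AA letters are copied as whole slices, one 'X' per offending char, joined once.

-- ===== PORT A =====
def replaceAA (sequence : String) (seqType : String) : String :=
  if seqType == "nucleotide" then sequence
  else
    -- seq = ''; for char in sequence: seq = seq + (char if char in AA else 'X')
    String.ofList (sequence.toList.foldl
      (fun seq c =>
        if c ∈ "ARNDCQEGHILKMFPSTWYV".toList then seq ++ [c] else seq ++ ['X']) [])

-- ===== PORT B =====
def pvIsAA (c : Char) : Bool := "ARNDCQEGHILKMFPSTWYV".toList.contains c

-- the outer while loop of Source B: the inner 'while j < n and sequence[j] in _AA' plus the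
-- slice sequence[i:j] is the span over the remaining characters; each invalid char yields 'X'
def pvRuns (l : List Char) : List (List Char) :=
  match h : l.span pvIsAA with
  | (run, []) => [run]
  | (run, c :: rest) => run :: ['X'] :: pvRuns rest
termination_by l.length
decreasing_by
  have hd := congrArg Prod.snd h
  rw [List.span_eq_takeWhile_dropWhile] at hd
  simp only at hd
  have hle := (List.dropWhile_sublist (p := pvIsAA) (l := l)).length_le
  rw [hd] at hle; simp at hle; omega

def replaceAA_alt (sequence : String) (seqType : String) : String :=
  if seqType == "nucleotide" then sequence
  else String.ofList (pvRuns sequence.toList).flatten   -- ''.join(parts)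

-- ===== PRECONDITION & SPEC =====
def Spec_replaceAA (sequence : String) (seqType : String) (out : String) : Prop := out = replaceAA_alt sequence seqType
instance (sequence : String) (seqType : String) (out : String) : Decidable (Spec_replaceAA sequence seqType out) := by unfold Spec_replaceAA; infer_instance

-- ===== CLAIM (what is proved, stated in full; the proofs are below) =====
def Claim_equal_replaceAA : Prop := ∀ (sequence : String) (seqType : String), Dom_replaceAA sequence seqType → Spec_replaceAA sequence seqType (replaceAA sequence seqType)

-- ===== LEMMAS AND PROOFS =====

lemma pvIsAA_iff (c : Char) : pvIsAA c = true ↔ c ∈ "ARNDCQEGHILKMFPSTWYV".toList := by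
  simp [pvIsAA]

lemma foldA_eq_map (l : List Char) (acc : List Char) :
    l.foldl (fun seq c =>
        if c ∈ "ARNDCQEGHILKMFPSTWYV".toList then seq ++ [c] else seq ++ ['X']) acc
      = acc ++ l.map (fun c => if pvIsAA c then c else 'X') := by
  have hstep : (fun (seq : List Char) (c : Char) =>
      if c ∈ "ARNDCQEGHILKMFPSTWYV".toList then seq ++ [c] else seq ++ ['X'])
      = (fun seq c => seq ++ [if pvIsAA c then c else 'X']) := by
    funext seq c
    by_cases hb : pvIsAA c = true
    · rw [if_pos ((pvIsAA_iff c).mp hb), if_pos hb]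
    · rw [if_neg (fun hm => hb ((pvIsAA_iff c).mpr hm)), if_neg hb]
  rw [hstep, PySem.List.foldl_append_singleton_eq_map]

lemma map_id_of_all (l : List Char) (h : ∀ x ∈ l, pvIsAA x = true) :
    l.map (fun c => if pvIsAA c then c else 'X') = l := by
  rw [List.map_congr_left (fun x hx => if_pos (h x hx))]; simp

lemma runs_flatten (l : List Char) :
    (pvRuns l).flatten = l.map (fun c => if pvIsAA c then c else 'X') := by
  fun_induction pvRuns l with
  | case1 l run h =>
    rw [List.span_eq_takeWhile_dropWhile] at h
    have hrun : l.takeWhile pvIsAA = run := congrArg Prod.fst h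
    have hd : l.dropWhile pvIsAA = [] := congrArg Prod.snd h
    have hl : l = run := by
      conv_lhs => rw [← List.takeWhile_append_dropWhile (p := pvIsAA) (l := l)]
      rw [hrun, hd, List.append_nil]
    have hmem : ∀ x ∈ l, pvIsAA x = true := fun x hx =>
      List.mem_takeWhile_imp (hrun ▸ hl ▸ hx)
    rw [map_id_of_all l hmem]
    simp [hl]
  | case2 l run c rest h ih =>
    rw [List.span_eq_takeWhile_dropWhile] at h
    have hrun : l.takeWhile pvIsAA = run := congrArg Prod.fst h
    have hd : l.dropWhile pvIsAA = c :: rest := congrArg Prod.snd h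
    have hc : pvIsAA c = false := by
      have h2 := List.head_dropWhile_not (p := pvIsAA) (l := l) (by rw [hd]; simp)
      simp only [hd, List.head_cons] at h2
      simpa using h2
    have hl : l = run ++ c :: rest := by
      conv_lhs => rw [← List.takeWhile_append_dropWhile (p := pvIsAA) (l := l)]
      rw [hrun, hd]
    have hmemrun : ∀ x ∈ run, pvIsAA x = true := fun x hx =>
      List.mem_takeWhile_imp (hrun ▸ hx)
    rw [hl, List.map_append, List.map_cons, if_neg (by simp [hc]), map_id_of_all run hmemrun]
    simp [ih]

-- ===== VERDICT (by name: the statement is the Claim_ definition above) =====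
theorem replaceAA_spec : Claim_equal_replaceAA := by
  intro sequence seqType _
  unfold Spec_replaceAA replaceAA replaceAA_alt
  by_cases h : seqType == "nucleotide"
  · simp [h]
  · simp only [h, Bool.false_eq_true, if_false]
    rw [foldA_eq_map, runs_flatten, List.nil_append]
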